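-- pv_equiv track=rewrite | github.com/Zaphoood/truthtables | truthtables.py | _unwrap_parentheses
-- ===== SOURCE A (Python) =====
-- def _unwrap_parentheses(literal: list[str]) -> list[str]:
--     stack = []
--     level = 0
--     for char in literal:
--         match char:
--             case "(":
--                 stack.append(level)
--                 level += 1
--             case ")":
--                 level -= 1
--                 stack.append(level)
--     while literal[0] == "(":
--         if literal[-1] != ")":
--             break
--         if stack[0] in stack[1:-1]:
--             break
--         stack = stack[1:-1]
--         literal = literal[1:-1]
--
--     return literal
-- ===== SOURCE B (Python) =====
-- def _unwrap_parentheses(literal: list[str]) -> list[str]: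
--     # Peel one enclosing layer at a time; instead of precomputing a stack of
--     # nesting levels for the whole input, test each layer directly with a
--     # single depth counter over the interior (early exit when depth hits 0).
--     while literal[0] == "(" and literal[-1] == ")":
--         depth = 1
--         encloses = True
--         for ch in literal[1:-1]:
--             if ch == "(":
--                 if depth == 0:
--                     encloses = False
--                     break
--                 depth += 1
--             elif ch == ")":
--                 depth -= 1
--                 if depth == 0:
--                     encloses = False
--                     break
--         if not encloses:
--             break
--         literal = literal[1:-1]
--     return literal
-- ===== Notes on version B (the rewrite author's own statement) =====
-- stated objective: alternative
-- what changed: Instead of precomputing a global stack of nesting levels and repeatedly testing membership stack[0] in stack[1:-1], B tests each enclosing layer directly with a single depth counter over the interior (early exit when the depth returns to 0), peeling one layer per test.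
import Mathlib
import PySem

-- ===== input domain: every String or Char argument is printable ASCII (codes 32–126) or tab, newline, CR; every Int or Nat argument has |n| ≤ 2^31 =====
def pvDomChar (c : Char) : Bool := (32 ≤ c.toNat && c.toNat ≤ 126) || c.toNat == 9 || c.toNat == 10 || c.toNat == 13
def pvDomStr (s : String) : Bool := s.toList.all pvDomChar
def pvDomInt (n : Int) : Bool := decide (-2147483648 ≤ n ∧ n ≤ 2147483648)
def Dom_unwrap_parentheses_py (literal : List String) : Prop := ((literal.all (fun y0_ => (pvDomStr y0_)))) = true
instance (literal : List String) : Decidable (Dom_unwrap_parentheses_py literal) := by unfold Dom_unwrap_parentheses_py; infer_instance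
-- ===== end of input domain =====

-- B replaces A's precomputed stack of nesting levels (and its membership test) by a
-- per-layer depth-counter scan of the interior; an alternative of the same cost.


-- ===== PORT A =====
-- the for-loop building (stack, level)
def pyAStack (literal : List String) : List Int × Int :=
  literal.foldl
    (fun (st : List Int × Int) char =>
      if char = "(" then (st.1 ++ [st.2], st.2 + 1)
      else if char = ")" then (st.1 ++ [st.2 - 1], st.2 - 1)
      else st)
    ([], 0)

-- used by the port's termination proof (cited in decreasing_by)
theorem pv_slice_one_neg_one {α : Type} (xs : List α) :
    PySem.List.slice xs (some 1) (some (-1)) = xs.tail.dropLast := by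
  cases xs with
  | nil => simp [PySem.List.slice]
  | cons x t =>
      simp [PySem.List.slice, PySem.List.clampIdx]
      rw [List.dropLast_eq_take, if_neg (by omega : ¬ ((t.length : Int) < 0))]

-- the while-loop: state (literal, stack), both shrunk by [1:-1] each iteration
def pyAWhile (literal : List String) (stack : List Int) : List String :=
  match h0 : PySem.List.pyGet? literal 0 with
  | none => literal      -- Python raises IndexError here (excluded by Pre_)
  | some c =>
    if c = "(" then
      if PySem.List.pyGet? literal (-1) ≠ some ")" then literal
      else
        match PySem.List.pyGet? stack 0 with
        | none => literal  -- Python would raise here; unreachable in A's actual run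
        | some s0 =>
          if s0 ∈ PySem.List.slice stack (some 1) (some (-1)) then literal
          else pyAWhile (PySem.List.slice literal (some 1) (some (-1)))
                        (PySem.List.slice stack (some 1) (some (-1)))
    else literal
termination_by literal.length
decreasing_by
  rw [pv_slice_one_neg_one]
  cases literal with
  | nil => simp [PySem.List.pyGet?, PySem.List.pyIdx?] at h0
  | cons x t =>
      simp only [List.tail_cons, List.length_dropLast, List.length_cons]
      omega

def unwrap_parentheses_py (literal : List String) : List String :=
  pyAWhile literal (pyAStack literal).1

-- ===== PORT B =====
-- the inner for-loop of B: depth counter with early exit; true = "encloses"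
def pyBScan : List String → Int → Bool
  | [], _ => true
  | ch :: rest, depth =>
    if ch = "(" then
      if depth = 0 then false else pyBScan rest (depth + 1)
    else if ch = ")" then
      if depth - 1 = 0 then false else pyBScan rest (depth - 1)
    else pyBScan rest depth

def pyBWhile (literal : List String) : List String :=
  match h0 : PySem.List.pyGet? literal 0 with
  | none => literal      -- Python raises IndexError here (excluded by Pre_)
  | some c =>
    if c = "(" ∧ PySem.List.pyGet? literal (-1) = some ")" then
      if pyBScan (PySem.List.slice literal (some 1) (some (-1))) 1 then
        pyBWhile (PySem.List.slice literal (some 1) (some (-1)))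
      else literal
    else literal
termination_by literal.length
decreasing_by
  rw [pv_slice_one_neg_one]
  cases literal with
  | nil => simp [PySem.List.pyGet?, PySem.List.pyIdx?] at h0
  | cons x t =>
      simp only [List.tail_cons, List.length_dropLast, List.length_cons]
      omega

def unwrap_parentheses_py_alt (literal : List String) : List String :=
  pyBWhile literal

-- ===== PRECONDITION & SPEC =====
-- Pre_ excludes exactly the inputs where Python A raises IndexError: the empty list and
-- "("^k ")"^k (the stripping empties the list and literal[0] is then read); B raises there too.
def Pre_unwrap_parentheses_py (literal : List String) : Prop :=
  literal ≠ List.replicate (literal.length / 2) "(" ++ List.replicate (literal.length / 2) ")"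
instance (literal : List String) : Decidable (Pre_unwrap_parentheses_py literal) := by
  unfold Pre_unwrap_parentheses_py; infer_instance

def pvWitness_unwrap_parentheses_py : List String := ["(", "p", ")"]

def Spec_unwrap_parentheses_py (literal : List String) (out : List String) : Prop := out = unwrap_parentheses_py_alt literal
instance (literal : List String) (out : List String) : Decidable (Spec_unwrap_parentheses_py literal out) := by unfold Spec_unwrap_parentheses_py; infer_instance

-- ===== CLAIM (what is proved, stated in full; the proofs are below) =====
def Claim_equal_unwrap_parentheses_py : Prop := ∀ (literal : List String), Dom_unwrap_parentheses_py literal → Pre_unwrap_parentheses_py literal → Spec_unwrap_parentheses_py literal (unwrap_parentheses_py literal)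

-- ===== LEMMAS AND PROOFS =====

-- structural reformulation of A's stack fold: the list of recorded levels, started at lvl
def aStack : List String → Int → List Int
  | [], _ => []
  | c :: rest, lvl =>
    if c = "(" then lvl :: aStack rest (lvl + 1)
    else if c = ")" then (lvl - 1) :: aStack rest (lvl - 1)
    else aStack rest lvl

def endLvl : List String → Int → Int
  | [], lvl => lvl
  | c :: rest, lvl =>
    if c = "(" then endLvl rest (lvl + 1)
    else if c = ")" then endLvl rest (lvl - 1)
    else endLvl rest lvl

theorem aStack_foldl (l : List String) :
    ∀ (acc : List Int) (lvl : Int),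
      l.foldl
        (fun (st : List Int × Int) char =>
          if char = "(" then (st.1 ++ [st.2], st.2 + 1)
          else if char = ")" then (st.1 ++ [st.2 - 1], st.2 - 1)
          else st)
        (acc, lvl) = (acc ++ aStack l lvl, endLvl l lvl) := by
  induction l with
  | nil => intro acc lvl; simp [aStack, endLvl]
  | cons c rest ih =>
      intro acc lvl
      by_cases h1 : c = "("
      · simp [h1, aStack, endLvl, ih]
      · by_cases h2 : c = ")"
        · simp [h2, aStack, endLvl, ih]
        · simp [h1, h2, aStack, endLvl, ih]

theorem pyAStack_eq (l : List String) : (pyAStack l).1 = aStack l 0 := by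
  unfold pyAStack
  rw [aStack_foldl]
  simp

theorem aStack_append (x y : List String) :
    ∀ lvl, aStack (x ++ y) lvl = aStack x lvl ++ aStack y (endLvl x lvl) := by
  induction x with
  | nil => intro lvl; simp [aStack, endLvl]
  | cons c rest ih =>
      intro lvl
      by_cases h1 : c = "("
      · simp [h1, aStack, endLvl, ih]
      · by_cases h2 : c = ")"
        · simp [h2, aStack, endLvl, ih]
        · simp [h1, h2, aStack, endLvl, ih]

-- the crux: B's depth scan fails on m (from depth d ≥ 1) iff level i recurs in
-- A's recorded levels of m started at level i + d
theorem scan_mem (i : Int) :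
    ∀ (m : List String) (d : Int), 1 ≤ d →
      (pyBScan m d = false ↔ i ∈ aStack m (i + d)) := by
  intro m
  induction m with
  | nil => intro d hd; simp [pyBScan, aStack]
  | cons c rest ih =>
      intro d hd
      by_cases h1 : c = "("
      · have hd0 : ¬ d = 0 := by omega
        have : i + d + 1 = i + (d + 1) := by ring
        simp [h1, pyBScan, aStack, hd0, this, ih (d + 1) (by omega)]
      · by_cases h2 : c = ")"
        · by_cases hd1 : d = 1
          · simp [h2, pyBScan, aStack, hd1]
          · have hdm : ¬ d - 1 = 0 := by omega
            have : i + d - 1 = i + (d - 1) := by ring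
            simp [h2, pyBScan, aStack, hdm, this, ih (d - 1) (by omega)]
        · simp [h1, h2, pyBScan, aStack, ih d hd]


-- unfold lemmas for the two while-loops once the head element is known
theorem pyAWhile_step (literal : List String) (stack : List Int) (c : String)
    (h : PySem.List.pyGet? literal 0 = some c) :
    pyAWhile literal stack =
      (if c = "(" then
        if PySem.List.pyGet? literal (-1) ≠ some ")" then literal
        else
          match PySem.List.pyGet? stack 0 with
          | none => literal
          | some s0 =>
            if s0 ∈ PySem.List.slice stack (some 1) (some (-1)) then literal
            else pyAWhile (PySem.List.slice literal (some 1) (some (-1)))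
                          (PySem.List.slice stack (some 1) (some (-1)))
      else literal) := by
  rw [pyAWhile]
  cases h0 : PySem.List.pyGet? literal 0 with
  | none => rw [h0] at h; cases h
  | some d => rw [h0] at h; injection h with h; subst h; rfl

theorem pyBWhile_step (literal : List String) (c : String)
    (h : PySem.List.pyGet? literal 0 = some c) :
    pyBWhile literal =
      (if c = "(" ∧ PySem.List.pyGet? literal (-1) = some ")" then
        if pyBScan (PySem.List.slice literal (some 1) (some (-1))) 1 then
          pyBWhile (PySem.List.slice literal (some 1) (some (-1)))
        else literal
      else literal) := by
  rw [pyBWhile]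
  cases h0 : PySem.List.pyGet? literal 0 with
  | none => rw [h0] at h; cases h
  | some d => rw [h0] at h; injection h with h; subst h; rfl

theorem main_invariant :
    ∀ (n : Nat) (l : List String) (i : Int), l.length ≤ n →
      pyAWhile l (aStack l i) = pyBWhile l := by
  intro n
  induction n with
  | zero =>
      intro l i hl
      have : l = [] := List.length_eq_zero_iff.mp (Nat.le_zero.mp hl)
      subst this
      simp [pyAWhile, pyBWhile, PySem.List.pyGet?, PySem.List.pyIdx?]
  | succ n ih =>
      intro l i hl
      cases h0 : PySem.List.pyGet? l 0 with
      | none => rw [pyAWhile, pyBWhile, h0]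
      | some c =>
        rw [pyAWhile_step _ _ _ h0, pyBWhile_step _ _ h0]
        by_cases hc : c = "("
        · subst hc
          by_cases hlast : PySem.List.pyGet? l (-1) = some ")"
          · -- l = "(" :: m ++ [")"]
            have hne : l ≠ [] := by
              intro h; subst h
              simp [PySem.List.pyGet?, PySem.List.pyIdx?] at h0
            obtain ⟨t, rfl⟩ : ∃ t, l = "(" :: t := by
              cases l with
              | nil => exact absurd rfl hne
              | cons x t =>
                  refine ⟨t, ?_⟩
                  rw [PySem.List.pyGet?_zero_cons] at h0
                  injection h0 with h0; rw [h0]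
            have htne : t ≠ [] := by
              intro h; subst h
              rw [PySem.List.pyGet?_neg_one] at hlast
              simp [List.getLast?] at hlast
            obtain ⟨m, rfl⟩ : ∃ m, t = m ++ [")"] := by
              have hgl : ("(" :: t).getLast? = some ")" := by
                rw [← PySem.List.pyGet?_neg_one]; exact hlast
              obtain ⟨l', hl'⟩ := List.getLast?_eq_some_iff.mp hgl
              cases l' with
              | nil =>
                  exfalso
                  simp only [List.nil_append] at hl'
                  have := (List.cons.injEq _ _ _ _).mp hl'
                  exact absurd this.1 (by decide)
              | cons a l'' =>
                  have := (List.cons.injEq _ _ _ _).mp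
                    (by simpa using hl' : "(" :: t = a :: (l'' ++ [")"]))
                  exact ⟨l'', this.2⟩
            have hstack : aStack ("(" :: (m ++ [")"])) i
                = i :: (aStack m (i + 1) ++ [endLvl m (i + 1) - 1]) := by
              simp only [aStack]
              rw [aStack_append]
              simp [aStack]
            have hsliceS : PySem.List.slice (i :: (aStack m (i + 1) ++ [endLvl m (i + 1) - 1]))
                (some 1) (some (-1)) = aStack m (i + 1) := by
              rw [pv_slice_one_neg_one]; simp
            have hsliceL : PySem.List.slice ("(" :: (m ++ [")"])) (some 1) (some (-1)) = m := by
              rw [pv_slice_one_neg_one]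
              simp
            rw [hstack]
            have hget0 : PySem.List.pyGet? (i :: (aStack m (i + 1) ++ [endLvl m (i + 1) - 1])) 0
                = some i := PySem.List.pyGet?_zero_cons _ _
            have hscan := scan_mem i m 1 (by omega)
            by_cases hmem : i ∈ aStack m (i + 1)
            · have hB : pyBScan m 1 = false := hscan.mpr hmem
              simp [hlast, hget0, hsliceS, hsliceL, hmem, hB]
            · have hB : pyBScan m 1 = true := by
                cases hb : pyBScan m 1 with
                | false => exact absurd (hscan.mp hb) hmem
                | true => rfl
              have hlen : m.length ≤ n := by
                simp at hl; omega
              simp [hlast, hget0, hsliceS, hsliceL, hmem, hB, ih m (i + 1) hlen]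
          · simp [hlast]
        · simp [hc]

-- ===== VERDICT (by name: the statement is the Claim_ definition above) =====
theorem unwrap_parentheses_py_spec : Claim_equal_unwrap_parentheses_py := by
  intro literal _ _
  unfold Spec_unwrap_parentheses_py unwrap_parentheses_py unwrap_parentheses_py_alt
  rw [pyAStack_eq]
  exact main_invariant literal.length literal 0 le_rfl
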